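-- pv_equiv track=rewrite | github.com/lemontime0106/Algorithm | 프로그래머스/3/64062. 징검다리 건너기/징검다리 건너기.py | solution
-- ===== SOURCE A (Python) =====
-- def solution(stones, k):
--     left, right = 1, max(stones)
--
--     while left <= right:
--         mid = (left + right) // 2
--         skip = 0
--
--         for stone in stones:
--             if stone - mid <= 0:
--                 skip += 1
--             else:
--                 skip = 0
--
--             if skip >= k:
--                 break
--
--         if skip >= k:
--             right = mid - 1
--         else:
--             left = mid + 1
--
--     return left
-- ===== SOURCE B (Python) =====
-- def solution(stones, k):
--     # Direct computation instead of A's binary search: the crossing stops at the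
--     # smallest maximum over any k consecutive stones; A's search confines its
--     # answer to [1, max(stones)+1], so the result is clamped identically.
--     if k <= 0:
--         return 1
--     n = len(stones)
--     best = max(stones) + 1  # value when no window of k stones exists
--     for i in range(n - k + 1):
--         best = min(best, max(stones[i:i + k]))
--     return max(1, best)
-- ===== Notes on version B (the rewrite author's own statement) =====
-- stated objective: alternative
-- what changed: Replaced A's binary search over people-counts (each step rescanning all stones for a k-run of too-small stones) with a direct computation of the minimum over all k-windows of the window maximum, clamped to A's search range [1, max(stones)+1].
import Mathlib
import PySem

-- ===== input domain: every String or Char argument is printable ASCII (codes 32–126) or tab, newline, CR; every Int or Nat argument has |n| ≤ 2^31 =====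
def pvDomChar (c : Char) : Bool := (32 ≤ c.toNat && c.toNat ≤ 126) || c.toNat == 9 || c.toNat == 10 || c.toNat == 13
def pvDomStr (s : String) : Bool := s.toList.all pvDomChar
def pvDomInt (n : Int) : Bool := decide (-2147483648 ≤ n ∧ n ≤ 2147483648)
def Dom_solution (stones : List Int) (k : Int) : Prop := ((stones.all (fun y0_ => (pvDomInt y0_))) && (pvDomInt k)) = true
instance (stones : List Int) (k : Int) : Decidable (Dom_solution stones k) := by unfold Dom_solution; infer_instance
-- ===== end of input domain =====

-- B replaces A's binary search over answers with a direct minimum of window maxima;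
-- equivalence is on the return value (neither version mutates its arguments).

-- ===== PORT A =====
-- inner 'for stone in stones' loop with its break (skip accumulator)
def solnSkip (x k : Int) : List Int → Int → Int
  | [], skip => skip
  | stone :: rest, skip =>
    let skip' := if stone - x ≤ 0 then skip + 1 else 0
    if skip' ≥ k then skip' else solnSkip x k rest skip'

-- the 'while left <= right' binary search
def solnSearch (stones : List Int) (k : Int) (left right : Int) : Int :=
  if h : left ≤ right then
    let mid := PySem.Int.floordiv (left + right) 2
    if solnSkip mid k stones 0 ≥ k then solnSearch stones k left (mid - 1)
    else solnSearch stones k (mid + 1) right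
  else left
termination_by (right + 1 - left).toNat
decreasing_by
  · have hb := PySem.Int.floordiv_two_mid_bounds h; omega
  · have hb := PySem.Int.floordiv_two_mid_bounds h; omega

def solution (stones : List Int) (k : Int) : Int :=
  match PySem.List.max? stones (fun y => y) with
  | none => 0  -- unreachable under Pre_solution: max([]) raises ValueError
  | some m => solnSearch stones k 1 m

-- ===== PORT B =====
def solution_alt (stones : List Int) (k : Int) : Int :=
  if k ≤ 0 then 1
  else
    match PySem.List.max? stones (fun y => y) with
    | none => 0  -- unreachable under Pre_solution: max([]) raises ValueError
    | some m =>
      let n : Int := stones.length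
      let best := (PySem.List.pyRange 0 (n - k + 1) 1).foldl
        (fun best i =>
          min best
            (match PySem.List.max? (PySem.List.slice stones (some i) (some (i + k))) (fun y => y) with
             | none => 0  -- unreachable: the slice is nonempty for every i in the range
             | some w => w))
        (m + 1)
      max 1 best

-- ===== PRECONDITION & SPEC =====
-- Pre_ excludes only the empty list, on which Python's max([]) raises ValueError in A (and in B for k ≥ 1).
def Pre_solution (stones : List Int) (k : Int) : Prop := stones ≠ []
instance (stones : List Int) (k : Int) : Decidable (Pre_solution stones k) := by
  unfold Pre_solution; infer_instance
def pvWitness_solution : List Int × Int := ([2, 4, 5, 3, 2, 1, 4, 2, 5, 1], 3)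

def Spec_solution (stones : List Int) (k : Int) (out : Int) : Prop := out = solution_alt stones k
instance (stones : List Int) (k : Int) (out : Int) : Decidable (Spec_solution stones k out) := by
  unfold Spec_solution; infer_instance

-- ===== CLAIM (what is proved, stated in full; the proofs are below) =====
def Claim_equal_solution : Prop := ∀ (stones : List Int) (k : Int), Dom_solution stones k → Pre_solution stones k → Spec_solution stones k (solution stones k)

-- ===== LEMMAS AND PROOFS =====

-- 'there are k consecutive stones all ≤ x'
def hasWindow (stones : List Int) (k x : Int) : Prop :=
  ∃ t : List Int, t <:+: stones ∧ t.length = k.toNat ∧ ∀ a ∈ t, a ≤ x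

theorem skip_ge_of_nonpos (x k : Int) (hk : k ≤ 0) (stones : List Int) (hne : stones ≠ []) :
    k ≤ solnSkip x k stones 0 := by
  cases stones with
  | nil => exact absurd rfl hne
  | cons h t =>
    simp only [solnSkip]
    split <;> (try split) <;> omega

theorem hasWindow_cons (hd : Int) (l : List Int) (k x : Int) (h : hasWindow l k x) :
    hasWindow (hd :: l) k x := by
  obtain ⟨t, hinf, hlen, hall⟩ := h
  exact ⟨t, hinf.trans (List.suffix_cons hd l).isInfix, hlen, hall⟩

theorem run_to_window (l : List Int) (k x : Int) (hk : 0 < k) (j : Nat)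
    (hj : j ≤ l.length) (hkj : k ≤ (j : Int)) (hall : ∀ a ∈ l.take j, a ≤ x) :
    hasWindow l k x := by
  refine ⟨l.take k.toNat, (List.take_prefix _ _).isInfix, ?_, ?_⟩
  · simp only [List.length_take]; omega
  · intro a ha
    apply hall
    have : (l.take j).take k.toNat = l.take k.toNat := by
      rw [List.take_take]; congr 1; omega
    rw [← this] at ha
    exact List.take_subset k.toNat (l.take j) ha

theorem skip_char (x k : Int) (hk : 0 < k) :
    ∀ (l : List Int) (s : Int), 0 ≤ s → s < k →
      (k ≤ solnSkip x k l s ↔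
        (∃ j : Nat, j ≤ l.length ∧ k ≤ s + j ∧ ∀ a ∈ l.take j, a ≤ x) ∨ hasWindow l k x) := by
  intro l
  induction l with
  | nil =>
    intro s h0 h1
    simp only [solnSkip]
    constructor
    · intro h; omega
    · rintro (⟨j, hj, hks, -⟩ | ⟨t, hinf, hlen, -⟩)
      · simp at hj; omega
      · rw [List.infix_nil] at hinf; subst hinf; simp at hlen; omega
  | cons hd tl ih =>
    intro s h0 h1
    simp only [solnSkip]
    by_cases hc : hd - x ≤ 0
    · rw [if_pos hc]
      by_cases hk2 : s + 1 ≥ k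
      · rw [if_pos hk2]
        constructor
        · intro _
          left
          refine ⟨1, by simp, by push_cast; omega, ?_⟩
          intro a ha
          simp [List.take_succ_cons] at ha
          omega
        · intro _; omega
      · rw [if_neg hk2]
        rw [ih (s + 1) (by omega) (by omega)]
        constructor
        · rintro (⟨j, hj, hks, hall⟩ | hw)
          · left
            refine ⟨j + 1, by simp; omega, by push_cast at hks ⊢; omega, ?_⟩
            intro a ha
            rw [List.take_succ_cons] at ha
            rcases List.mem_cons.mp ha with rfl | ha
            · omega
            · exact hall a ha
          · exact Or.inr (hasWindow_cons hd tl k x hw)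
        · rintro (⟨j, hj, hks, hall⟩ | hw)
          · cases j with
            | zero => push_cast at hks; omega
            | succ j' =>
              left
              refine ⟨j', by simp at hj; omega, by push_cast at hks ⊢; omega, ?_⟩
              intro a ha
              exact hall a (by rw [List.take_succ_cons]; exact List.mem_cons_of_mem hd ha)
          · obtain ⟨t, hinf, hlen, hall⟩ := hw
            rcases List.infix_cons_iff.mp hinf with hpre | hinf'
            · left
              have htk : t = (hd :: tl).take k.toNat := by
                rw [List.prefix_iff_eq_take.mp hpre, hlen]
              have hkt : 1 ≤ k.toNat := by omega
              have hlen2 : k.toNat ≤ tl.length + 1 := by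
                have := hpre.length_le
                simp [hlen] at this; omega
              refine ⟨k.toNat - 1, by omega, by omega, ?_⟩
              intro a ha
              apply hall
              rw [htk]
              have : k.toNat = (k.toNat - 1) + 1 := by omega
              rw [this, List.take_succ_cons]
              exact List.mem_cons_of_mem hd ha
            · exact Or.inr ⟨t, hinf', hlen, hall⟩
    · rw [if_neg hc]
      rw [if_neg (by omega)]
      rw [ih 0 le_rfl (by omega)]
      constructor
      · rintro (⟨j, hj, hks, hall⟩ | hw)
        · exact Or.inr (hasWindow_cons hd tl k x
            (run_to_window tl k x hk j hj (by push_cast at hks ⊢; omega) hall))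
        · exact Or.inr (hasWindow_cons hd tl k x hw)
      · rintro (⟨j, hj, hks, hall⟩ | hw)
        · cases j with
          | zero => push_cast at hks; omega
          | succ j' =>
            exfalso
            have : hd ≤ x := hall hd (by rw [List.take_succ_cons]; exact List.mem_cons_self ..)
            omega
        · obtain ⟨t, hinf, hlen, hall⟩ := hw
          rcases List.infix_cons_iff.mp hinf with hpre | hinf'
          · exfalso
            have htk : t = (hd :: tl).take k.toNat := by
              rw [List.prefix_iff_eq_take.mp hpre, hlen]
            have : hd ∈ t := by
              rw [htk]
              have : k.toNat = (k.toNat - 1) + 1 := by omega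
              rw [this, List.take_succ_cons]
              exact List.mem_cons_self ..
            have := hall hd this
            omega
          · exact Or.inr ⟨t, hinf', hlen, hall⟩

theorem skip_iff_window (x k : Int) (hk : 0 < k) (stones : List Int) :
    k ≤ solnSkip x k stones 0 ↔ hasWindow stones k x := by
  rw [skip_char x k hk stones 0 le_rfl hk]
  constructor
  · rintro (⟨j, hj, hks, hall⟩ | hw)
    · exact run_to_window stones k x hk j hj (by omega) hall
    · exact hw
  · exact Or.inr

theorem foldl_min_le_iff (f : Int → Int) :
    ∀ (l : List Int) (a x : Int),
      (l.foldl (fun b i => min b (f i)) a ≤ x) ↔ a ≤ x ∨ ∃ i ∈ l, f i ≤ x := by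
  intro l
  induction l with
  | nil => intro a x; simp [List.foldl]
  | cons h t ih =>
    intro a x
    simp only [List.foldl, ih, min_le_iff, List.mem_cons]
    constructor
    · rintro (⟨h1 | h1⟩ | ⟨i, hi, hfi⟩)
      · exact Or.inl h1
      · exact Or.inr ⟨h, Or.inl rfl, h1⟩
      · exact Or.inr ⟨i, Or.inr hi, hfi⟩
    · rintro (h1 | ⟨i, (rfl | hi), hfi⟩)
      · exact Or.inl (Or.inl h1)
      · exact Or.inl (Or.inr hfi)
      · exact Or.inr ⟨i, hi, hfi⟩

theorem window_iff_best (stones : List Int) (k x : Int) (hk : 0 < k) :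
    (∃ i ∈ PySem.List.pyRange 0 ((stones.length : Int) - k + 1) 1,
        (match PySem.List.max? (PySem.List.slice stones (some i) (some (i + k))) (fun y => y) with
         | none => (0 : Int) | some w => w) ≤ x)
      ↔ hasWindow stones k x := by
  constructor
  · rintro ⟨i, hmem, hle⟩
    rw [PySem.List.mem_pyRange_one] at hmem
    have h0i : 0 ≤ i := hmem.1
    have hik : i + k ≤ (stones.length : Int) := by omega
    have hsl : PySem.List.slice stones (some i) (some (i + k))
        = (stones.drop i.toNat).take k.toNat := by
      rw [PySem.List.slice_toNat stones h0i (by omega)]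
      congr 1; omega
    rw [hsl] at hle
    have hwlen : ((stones.drop i.toNat).take k.toNat).length = k.toNat := by
      simp only [List.length_take, List.length_drop]; omega
    cases hmw : PySem.List.max? ((stones.drop i.toNat).take k.toNat) (fun y => y) with
    | none =>
      rw [PySem.List.max?_eq_none_iff] at hmw
      rw [hmw] at hwlen; simp at hwlen; omega
    | some m =>
      rw [hmw] at hle
      simp only at hle
      refine ⟨(stones.drop i.toNat).take k.toNat, ?_, hwlen, ?_⟩
      · refine ⟨stones.take i.toNat, stones.drop (i.toNat + k.toNat), ?_⟩
        rw [← List.drop_drop, List.append_assoc, List.take_append_drop, List.take_append_drop]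
      · intro a ha
        exact le_trans (PySem.List.max?_isMax hmw a ha) hle
  · rintro ⟨t, ⟨u, v, heq⟩, hlen, hall⟩
    have hne : t ≠ [] := by
      intro h; rw [h] at hlen; simp at hlen; omega
    have hlenstones : stones.length = u.length + t.length + v.length := by
      rw [← heq]; simp; omega
    cases hmt : PySem.List.max? t (fun y => y) with
    | none =>
      rw [PySem.List.max?_eq_none_iff] at hmt
      exact absurd hmt hne
    | some m =>
      refine ⟨(u.length : Int), ?_, ?_⟩
      · rw [PySem.List.mem_pyRange_one]
        constructor
        · omega
        · push_cast; omega
      · have hsl : PySem.List.slice stones (some (u.length : Int))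
            (some ((u.length : Int) + k)) = t := by
          rw [PySem.List.slice_toNat stones (by omega) (by omega)]
          have h1 : ((u.length : Int) + k).toNat - ((u.length : Int)).toNat = t.length := by
            omega
          rw [h1]
          rw [← heq, List.append_assoc, Int.toNat_natCast, List.drop_left, List.take_left]
        rw [hsl, hmt]
        simp only
        exact hall m (PySem.List.max?_mem hmt)

theorem search_eq (stones : List Int) (k t : Int) :
    ∀ (n : Nat) (lo hi : Int), (hi + 1 - lo).toNat = n →
      (∀ x, lo ≤ x → x ≤ hi → (k ≤ solnSkip x k stones 0 ↔ t ≤ x)) →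
      solnSearch stones k lo hi = max lo (min t (hi + 1)) := by
  intro n
  induction n using Nat.strong_induction_on with
  | _ n ih =>
    intro lo hi hn hiff
    rw [solnSearch]
    split
    · rename_i h
      have hb := PySem.Int.floordiv_two_mid_bounds h
      have hx := hiff (PySem.Int.floordiv (lo + hi) 2) hb.1 hb.2
      simp only [ge_iff_le]
      split
      · rename_i hs
        have ht : t ≤ PySem.Int.floordiv (lo + hi) 2 := hx.mp hs
        rw [ih (PySem.Int.floordiv (lo + hi) 2 - 1 + 1 - lo).toNat (by omega)
            lo (PySem.Int.floordiv (lo + hi) 2 - 1) rfl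
            (fun y h1 h2 => hiff y h1 (by omega))]
        omega
      · rename_i hs
        have ht : ¬ t ≤ PySem.Int.floordiv (lo + hi) 2 := fun hh => hs (hx.mpr hh)
        rw [ih (hi + 1 - (PySem.Int.floordiv (lo + hi) 2 + 1)).toNat (by omega)
            (PySem.Int.floordiv (lo + hi) 2 + 1) hi rfl
            (fun y h1 h2 => hiff y (by omega) h2)]
        omega
    · rename_i h
      omega

theorem solution_spec : Claim_equal_solution := by
  intro stones k _ hpre
  cases hmax : PySem.List.max? stones (fun y => y) with
  | none =>
    rw [PySem.List.max?_eq_none_iff] at hmax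
    exact absurd hmax hpre
  | some m =>
    simp only [Spec_solution, solution, solution_alt, hmax]
    by_cases hk : k ≤ 0
    · rw [if_pos hk]
      rw [search_eq stones k 1 (m + 1 - 1).toNat 1 m rfl
          (fun y h1 _ => iff_of_true (skip_ge_of_nonpos y k hk stones hpre) h1)]
      omega
    · rw [if_neg hk]
      have hk' : 0 < k := by omega
      rw [search_eq stones k
          ((PySem.List.pyRange 0 ((stones.length : Int) - k + 1) 1).foldl
            (fun best i => min best
              (match PySem.List.max? (PySem.List.slice stones (some i) (some (i + k))) (fun y => y) with
               | none => (0 : Int) | some w => w)) (m + 1))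
          (m + 1 - 1).toNat 1 m rfl ?_]
      · have hle := (foldl_min_le_iff
          (fun i => match PySem.List.max? (PySem.List.slice stones (some i) (some (i + k))) (fun y => y) with
                    | none => (0 : Int) | some w => w)
          (PySem.List.pyRange 0 ((stones.length : Int) - k + 1) 1) (m + 1) (m + 1)).mpr
          (Or.inl le_rfl)
        omega
      · intro y h1 h2
        rw [skip_iff_window y k hk' stones]
        rw [← window_iff_best stones k y hk']
        rw [foldl_min_le_iff]
        constructor
        · exact Or.inr
        · rintro (hm | hex)
          · omega
          · exact hex
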